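-- pv_equiv track=rewrite | github.com/Oralbaev/nonogram-solver | parser.py | _merge_narrow_col_bands
-- ===== SOURCE A (Python) =====
-- def _merge_narrow_col_bands(bands: list, min_gap_px: int) -> list:
--     """
--     Merge consecutive line bands when the cell gap between them is < min_gap_px.
--
--     Over-segmentation of the left clue area happens when digit strokes project
--     as spurious vertical bands.  A gap narrower than ~half the board cell width
--     is almost certainly a digit stroke, not a real grid-line separator.
--
--     Algorithm:
--         Walk the band list left→right.  If the gap between the end of the
--         last accepted band and the start of the current band is < min_gap_px,
--         absorb the current band into the last accepted one (extend its right
--         edge).  Otherwise accept it as a new band.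
--     """
--     if len(bands) < 3:   # need ≥3 bands (≥2 cells) to be worth merging
--         return bands
--
--     result = [bands[0]]
--     for band in bands[1:]:
--         gap = band[0] - result[-1][1] - 1   # pixels between prev end and curr start
--         if gap < min_gap_px:
--             # Merge: extend the last accepted band rightward
--             result[-1] = (result[-1][0], band[1])
--         else:
--             result.append(band)
--     return result
-- ===== SOURCE B (Python) =====
-- def _merge_narrow_col_bands(bands: list, min_gap_px: int) -> list:
--     """Split-point decomposition: partition bands into consecutive groups at
--     gaps >= min_gap_px, then emit each group as one band (singletons keep the
--     original object)."""
--     if len(bands) < 3:   # need >=3 bands (>=2 cells) to be worth merging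
--         return bands
--     groups = []
--     cur = [bands[0]]
--     for prev, band in zip(bands, bands[1:]):
--         if band[0] - prev[1] - 1 < min_gap_px:
--             cur.append(band)
--         else:
--             groups.append(cur)
--             cur = [band]
--     groups.append(cur)
--     return [g[0] if len(g) == 1 else (g[0][0], g[-1][1]) for g in groups]
-- ===== Notes on version B (the rewrite author's own statement) =====
-- stated objective: alternative
-- what changed: Instead of mutating the last accepted band inside a running result list, B partitions the bands into consecutive groups at the wide gaps (computed between adjacent ORIGINAL bands) and then maps each group to one band (singletons emit the original band object).
import Mathlib
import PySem

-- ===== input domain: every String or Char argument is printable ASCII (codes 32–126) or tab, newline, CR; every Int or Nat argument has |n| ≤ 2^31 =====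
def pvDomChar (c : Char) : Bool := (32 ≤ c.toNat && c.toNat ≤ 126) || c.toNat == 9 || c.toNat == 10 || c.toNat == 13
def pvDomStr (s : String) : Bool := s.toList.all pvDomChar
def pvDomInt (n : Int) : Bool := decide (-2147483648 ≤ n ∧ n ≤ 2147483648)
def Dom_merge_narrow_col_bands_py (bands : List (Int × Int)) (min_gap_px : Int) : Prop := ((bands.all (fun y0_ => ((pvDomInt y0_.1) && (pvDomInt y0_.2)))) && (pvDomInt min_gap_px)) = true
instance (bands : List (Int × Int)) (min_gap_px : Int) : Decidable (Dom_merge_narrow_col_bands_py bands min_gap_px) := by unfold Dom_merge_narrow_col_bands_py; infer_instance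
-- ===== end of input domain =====

-- B replaces A's mutate-the-last-accepted-band loop by a split-point decomposition
-- (group bands at wide gaps between ORIGINAL neighbours, then map each group to a band);
-- same O(n) cost, different decomposition ("alternative").

-- ===== PORT A =====
-- A's result list, kept reversed so that `result[-1]` is the head.
def mergeA_step (min_gap_px : Int) (rev : List (Int × Int)) (band : Int × Int) : List (Int × Int) :=
  match rev with
  | [] => [band]          -- unreachable: rev starts nonempty
  | last :: rest =>
    if band.1 - last.2 - 1 < min_gap_px then (last.1, band.2) :: rest
    else band :: last :: rest

def merge_narrow_col_bands_py (bands : List (Int × Int)) (min_gap_px : Int) : List (Int × Int) :=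
  if bands.length < 3 then bands
  else
    match bands with
    | [] => bands
    | b0 :: rest => (rest.foldl (mergeA_step min_gap_px) [b0]).reverse

-- ===== PORT B =====
def mergeB_step (min_gap_px : Int) (st : List (List (Int × Int)) × List (Int × Int))
    (pb : (Int × Int) × (Int × Int)) : List (List (Int × Int)) × List (Int × Int) :=
  if pb.2.1 - pb.1.2 - 1 < min_gap_px then (st.1, st.2 ++ [pb.2])
  else (st.1 ++ [st.2], [pb.2])

-- `g[0] if len(g) == 1 else (g[0][0], g[-1][1])`
def emitB (g : List (Int × Int)) : Int × Int :=
  if g.length == 1 then g.headD (0, 0) else ((g.headD (0, 0)).1, (g.getLastD (0, 0)).2)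

def merge_narrow_col_bands_py_alt (bands : List (Int × Int)) (min_gap_px : Int) : List (Int × Int) :=
  if bands.length < 3 then bands
  else
    match bands with
    | [] => bands
    | b0 :: _ =>
      let st := (bands.zip bands.tail).foldl (mergeB_step min_gap_px) ([], [b0])
      (st.1 ++ [st.2]).map emitB

-- ===== PRECONDITION & SPEC =====
def Spec_merge_narrow_col_bands_py (bands : List (Int × Int)) (min_gap_px : Int) (out : List (Int × Int)) : Prop := out = merge_narrow_col_bands_py_alt bands min_gap_px
instance (bands : List (Int × Int)) (min_gap_px : Int) (out : List (Int × Int)) : Decidable (Spec_merge_narrow_col_bands_py bands min_gap_px out) := by unfold Spec_merge_narrow_col_bands_py; infer_instance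

-- ===== CLAIM (what is proved, stated in full; the proofs are below) =====
def Claim_equal_merge_narrow_col_bands_py : Prop := ∀ (bands : List (Int × Int)) (min_gap_px : Int), Dom_merge_narrow_col_bands_py bands min_gap_px → Spec_merge_narrow_col_bands_py bands min_gap_px (merge_narrow_col_bands_py bands min_gap_px)

-- ===== LEMMAS AND PROOFS =====

-- Common reference recursion both ports are reduced to.
def mergeSpec (g : Int) (last : Int × Int) : List (Int × Int) → List (Int × Int)
  | [] => [last]
  | b :: rest =>
    if b.1 - last.2 - 1 < g then mergeSpec g (last.1, b.2) rest
    else last :: mergeSpec g b rest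

lemma mergeA_foldl (g : Int) (l : List (Int × Int)) :
    ∀ (last : Int × Int) (acc : List (Int × Int)),
      (l.foldl (mergeA_step g) (last :: acc)).reverse = acc.reverse ++ mergeSpec g last l := by
  induction l with
  | nil => intro last acc; simp [mergeSpec]
  | cons b rest ih =>
    intro last acc
    simp only [List.foldl_cons, mergeA_step, mergeSpec]
    by_cases h : b.1 - last.2 - 1 < g
    · simp [h, ih]
    · simp [h, ih (b) (last :: acc)]

lemma emitB_ne_nil (g : List (Int × Int)) (h : g ≠ []) :
    emitB g = ((g.headD (0, 0)).1, (g.getLastD (0, 0)).2) := by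
  match g, h with
  | [x], _ => simp [emitB]
  | x :: y :: t, _ =>
    have : (x :: y :: t).length ≠ 1 := by simp
    simp [emitB]

lemma mergeB_foldl (g : Int) (l : List (Int × Int)) :
    ∀ (groups : List (List (Int × Int))) (front : List (Int × Int)) (last : Int × Int),
      (fun st : List (List (Int × Int)) × List (Int × Int) => (st.1 ++ [st.2]).map emitB)
          (((last :: l).zip l).foldl (mergeB_step g) (groups, front ++ [last]))
        = groups.map emitB ++ mergeSpec g (((front ++ [last]).headD (0, 0)).1, last.2) l := by
  induction l with
  | nil =>
    intro groups front last
    have hne : front ++ [last] ≠ [] := by simp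
    simp [mergeSpec, emitB_ne_nil _ hne]
  | cons b rest ih =>
    intro groups front last
    simp only [List.zip_cons_cons, List.foldl_cons, mergeB_step, mergeSpec]
    by_cases h : b.1 - last.2 - 1 < g
    · rw [if_pos h, if_pos h]
      have hthis := ih groups (front ++ [last]) b
      have hh : ((front ++ [last] ++ [b]).headD (0, 0)) = ((front ++ [last]).headD (0, 0)) := by
        cases front <;> simp
      rw [hh] at hthis
      simpa using hthis
    · rw [if_neg h, if_neg h]
      have hthis := ih (groups ++ [front ++ [last]]) [] b
      simp only [List.nil_append] at hthis
      rw [hthis]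
      have hne : front ++ [last] ≠ [] := by simp
      simp [emitB_ne_nil _ hne]

theorem ports_agree (bands : List (Int × Int)) (g : Int) :
    merge_narrow_col_bands_py bands g = merge_narrow_col_bands_py_alt bands g := by
  unfold merge_narrow_col_bands_py merge_narrow_col_bands_py_alt
  by_cases hlen : bands.length < 3
  · simp [hlen]
  · cases bands with
    | nil => simp at hlen
    | cons b0 rest =>
      simp only [hlen, if_false, List.tail_cons]
      have hA := mergeA_foldl g rest b0 []
      simp only [List.reverse_nil, List.nil_append] at hA
      have hB := mergeB_foldl g rest [] [] b0
      simp only [List.nil_append, List.map_nil, List.headD_cons] at hB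
      rw [hA, hB]

-- ===== VERDICT (by name: the statement is the Claim_ definition above) =====
theorem merge_narrow_col_bands_py_spec : Claim_equal_merge_narrow_col_bands_py := by
  intro bands g _
  unfold Spec_merge_narrow_col_bands_py
  exact ports_agree bands g
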